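-- pv_equiv track=rewrite | github.com/ehupin/side-stacker-backend | matrix_utils.py | get_series_indexes_in_list
-- ===== SOURCE A (Python) =====
-- def get_series_indexes_in_list(list_, value):
--     """ Return 2 int tuple with first and last index for each serie of given value in list_
--
--     E.g.
--     >>> get_series_indexes_in_list([1, 1, 0, 1, 1, 0, 0], 1)
--     [[0,1],[3,4]]
--
--     :param list_: the list to inspect
--     :type list_: `list`
--
--     :param value: the value to search
--     :type value: any
--
--     :return: list of tuples with first and last index for each serie
--     :type: `list` of `tuple` of `int`
--     """
--     series_indexes = []
--     for i in range(len(list_)):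
--         if series_indexes and len(series_indexes[-1]) < 2:
--             current_series = series_indexes[-1]
--         else:
--             current_series = []
--
--
--         if list_[i] == value:
--             if not current_series:
--                 current_series.append(i)
--                 series_indexes.append(current_series)
--             if i == len(list_)-1:
--                 current_series.append(i)
--         else:
--             if len(current_series) == 1:
--                 current_series.append(i-1)
--     return [tuple(i) for i in series_indexes]
-- ===== SOURCE B (Python) =====
-- def get_series_indexes_in_list(list_, value):
--     """Boundary-scan reimplementation: compute run starts and run ends
--     independently from a boolean mask and zip them together."""
--     mask = [x == value for x in list_]
--     prev = [False] + mask[:-1]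
--     nxt = mask[1:] + [False]
--     starts = [i for i, (m, p) in enumerate(zip(mask, prev)) if m and not p]
--     ends = [i for i, (m, q) in enumerate(zip(mask, nxt)) if m and not q]
--     return list(zip(starts, ends))
-- ===== Notes on version B (the rewrite author's own statement) =====
-- stated objective: alternative
-- what changed: Replaces A's stateful loop that mutates a growing list of partially-built series with a stateless boundary scan: a boolean mask is built once, run starts (true with false/none before) and run ends (true with false/none after) are collected by two independent comprehensions and zipped into pairs.
import Mathlib
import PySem

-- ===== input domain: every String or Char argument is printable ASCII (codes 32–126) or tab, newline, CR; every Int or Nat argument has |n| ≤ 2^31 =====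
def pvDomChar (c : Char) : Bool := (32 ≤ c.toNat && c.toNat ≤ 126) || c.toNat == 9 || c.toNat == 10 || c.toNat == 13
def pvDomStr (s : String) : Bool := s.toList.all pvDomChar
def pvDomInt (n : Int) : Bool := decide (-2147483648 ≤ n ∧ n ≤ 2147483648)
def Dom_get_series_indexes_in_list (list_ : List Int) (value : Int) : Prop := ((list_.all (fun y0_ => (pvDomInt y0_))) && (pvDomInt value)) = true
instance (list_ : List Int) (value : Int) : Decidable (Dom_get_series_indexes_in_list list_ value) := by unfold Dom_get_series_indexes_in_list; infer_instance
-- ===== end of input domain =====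

-- B replaces A's stateful loop (mutating a list of partially built series) by an
-- independent boundary scan: run starts and run ends are collected separately and zipped.

-- ===== PORT A =====
-- Transliteration of A's loop `for i in range(len(list_)): … list_[i] …` as a fold over
-- the enumerated list; the mutable list-of-lists `series_indexes` is the fold state
-- (mutation of its last element `series_indexes[-1]` becomes dropLast ++ [mutated last]).
def get_series_indexes_in_list (list_ : List Int) (value : Int) : List (Int × Int) :=
  let n : Int := list_.length
  let series : List (List Int) :=
    (PySem.List.enumerate list_ 0).foldl (fun s p =>
      let i := p.1
      let x := p.2
      -- if series_indexes and len(series_indexes[-1]) < 2: current_series = series_indexes[-1]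
      if s ≠ [] ∧ (PySem.List.pyGetD s (-1) []).length < 2 then
        let current := PySem.List.pyGetD s (-1) []
        if x = value then
          -- `not current_series` is false here; only the end-of-list close can fire
          if i = n - 1 then s.dropLast ++ [current ++ [i]] else s
        else
          -- len(current_series) == 1: close the series at i-1
          s.dropLast ++ [current ++ [i - 1]]
      else
        -- current_series = []
        if x = value then
          -- append i, append the new series; possibly also close it at end of list
          if i = n - 1 then s ++ [[i, i]] else s ++ [[i]]
        else s) []
  -- [tuple(i) for i in series_indexes]; every finished series is a 2-list, tuple = pair
  series.map (fun r => (PySem.List.pyGetD r 0 0, PySem.List.pyGetD r 1 0))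

-- ===== PORT B =====
def get_series_indexes_in_list_alt (list_ : List Int) (value : Int) : List (Int × Int) :=
  let mask : List Bool := list_.map (fun x => x == value)
  let prev : List Bool := false :: PySem.List.slice mask none (some (-1))   -- [False] + mask[:-1]
  let nxt : List Bool := PySem.List.slice mask (some 1) none ++ [false]     -- mask[1:] + [False]
  let starts : List Int :=
    (PySem.List.enumerate (mask.zip prev) 0).filterMap
      (fun p => if p.2.1 && !p.2.2 then some p.1 else none)
  let ends : List Int :=
    (PySem.List.enumerate (mask.zip nxt) 0).filterMap
      (fun p => if p.2.1 && !p.2.2 then some p.1 else none)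
  starts.zip ends

-- ===== PRECONDITION & SPEC =====
def Spec_get_series_indexes_in_list (list_ : List Int) (value : Int) (out : List (Int × Int)) : Prop := out = get_series_indexes_in_list_alt list_ value
instance (list_ : List Int) (value : Int) (out : List (Int × Int)) : Decidable (Spec_get_series_indexes_in_list list_ value out) := by unfold Spec_get_series_indexes_in_list; infer_instance

-- ===== CLAIM (what is proved, stated in full; the proofs are below) =====
def Claim_equal_get_series_indexes_in_list : Prop := ∀ (list_ : List Int) (value : Int), Dom_get_series_indexes_in_list list_ value → Spec_get_series_indexes_in_list list_ value (get_series_indexes_in_list list_ value)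

-- ===== LEMMAS AND PROOFS =====

-- Reference description of both programs: runs of `true` in the mask, with an optional
-- open run started at `st`; `k` is the absolute index of the head of the remaining mask.
def pvRuns : List Bool → Int → Option Int → List (Int × Int)
  | [], _, none => []
  | [], k, some s => [(s, k - 1)]
  | m :: ms, k, none => if m then pvRuns ms (k + 1) (some k) else pvRuns ms (k + 1) none
  | m :: ms, k, some s =>
      if m then pvRuns ms (k + 1) (some s) else (s, k - 1) :: pvRuns ms (k + 1) none

-- Recursive forms of B's two comprehensions.
def pvStarts : List Bool → Int → Bool → List Int
  | [], _, _ => []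
  | m :: ms, k, p => (if m && !p then [k] else []) ++ pvStarts ms (k + 1) m

def pvEnds : List Bool → Int → List Int
  | [], _ => []
  | [m], k => if m then [k] else []
  | m :: m2 :: ms, k => (if m && !m2 then [k] else []) ++ pvEnds (m2 :: ms) (k + 1)

theorem pvStarts_eq (ms : List Bool) : ∀ (k : Int) (p : Bool),
    (PySem.List.enumerate (ms.zip (p :: ms.dropLast)) k).filterMap
      (fun q => if q.2.1 && !q.2.2 then some q.1 else none) = pvStarts ms k p := by
  induction ms with
  | nil => intro k p; simp [pvStarts, PySem.List.enumerate_nil]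
  | cons m t ih =>
    intro k p
    cases t with
    | nil =>
      cases m <;> cases p <;>
        simp [pvStarts, PySem.List.enumerate_cons, PySem.List.enumerate_nil]
    | cons m2 t2 =>
      have hd : (m :: m2 :: t2).dropLast = m :: (m2 :: t2).dropLast := rfl
      rw [hd, List.zip_cons_cons, PySem.List.enumerate_cons, List.filterMap_cons,
        ih (k + 1) m]
      cases m <;> cases p <;> simp [pvStarts]

theorem pvEnds_eq (m : Bool) (ms : List Bool) : ∀ (k : Int),
    (PySem.List.enumerate ((m :: ms).zip (ms ++ [false])) k).filterMap
      (fun q => if q.2.1 && !q.2.2 then some q.1 else none) = pvEnds (m :: ms) k := by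
  induction ms generalizing m with
  | nil =>
    intro k
    cases m <;>
      simp [pvEnds, PySem.List.enumerate_cons, PySem.List.enumerate_nil]
  | cons m2 t ih =>
    intro k
    simp only [List.cons_append, List.zip_cons_cons, PySem.List.enumerate_cons, List.filterMap_cons]
    rw [ih m2 (k + 1)]
    cases m <;> cases m2 <;> simp [pvEnds]

-- starts irrelevance of the `prev` flag when the head is false
theorem pvStarts_false_head (ms : List Bool) (k : Int) (p : Bool) :
    pvStarts (false :: ms) k p = pvStarts ms (k + 1) false := by
  cases ms with
  | nil => simp [pvStarts]
  | cons m t =>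
    cases m <;> simp [pvStarts]

theorem pvZip_runs (ms : List Bool) :
    (∀ k : Int, (pvStarts ms k false).zip (pvEnds ms k) = pvRuns ms k none) ∧
    (∀ (k s : Int), ms.head? = some true →
      ((s :: pvStarts ms k true).zip (pvEnds ms k) = pvRuns ms k (some s))) := by
  induction ms with
  | nil =>
    refine ⟨fun k => by simp [pvStarts, pvEnds, pvRuns], fun k s h => by simp at h⟩
  | cons m t ih =>
    obtain ⟨ihC, ihO⟩ := ih
    constructor
    · intro k
      cases m with
      | false =>
        cases t with
        | nil => simp [pvStarts, pvEnds, pvRuns]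
        | cons m2 r =>
          have h1 : pvStarts (false :: m2 :: r) k false
              = pvStarts (m2 :: r) (k + 1) false := pvStarts_false_head _ _ _
          have h2 : pvEnds (false :: m2 :: r) k = pvEnds (m2 :: r) (k + 1) := by
            simp [pvEnds]
          rw [h1, h2, ihC (k + 1)]
          simp [pvRuns]
      | true =>
        cases t with
        | nil => simp [pvStarts, pvEnds, pvRuns]
        | cons m2 r =>
          cases m2 with
          | true =>
            have h1 : pvStarts (true :: true :: r) k false
                = k :: pvStarts (true :: r) (k + 1) true := by simp [pvStarts]
            have h2 : pvEnds (true :: true :: r) k = pvEnds (true :: r) (k + 1) := by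
              simp [pvEnds]
            rw [h1, h2, ihO (k + 1) k rfl]
            simp [pvRuns]
          | false =>
            have h1 : pvStarts (true :: false :: r) k false
                = k :: pvStarts r (k + 1 + 1) false := by
              simp [pvStarts]
            have h2 : pvEnds (true :: false :: r) k = k :: pvEnds (false :: r) (k + 1) := by
              simp [pvEnds]
            have h3 : pvStarts (false :: r) (k + 1) false = pvStarts r (k + 1 + 1) false :=
              pvStarts_false_head _ _ _
            rw [h1, h2, List.zip_cons_cons, ← h3, ihC (k + 1)]
            simp [pvRuns]
    · intro k s h
      have hm : m = true := by simpa using h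
      subst hm
      cases t with
      | nil => simp [pvStarts, pvEnds, pvRuns]
      | cons m2 r =>
        cases m2 with
        | true =>
          have h1 : pvStarts (true :: true :: r) k true
              = pvStarts (true :: r) (k + 1) true := by simp [pvStarts]
          have h2 : pvEnds (true :: true :: r) k = pvEnds (true :: r) (k + 1) := by
            simp [pvEnds]
          rw [h1, h2, ihO (k + 1) s rfl]
          simp [pvRuns]
        | false =>
          have h1 : pvStarts (true :: false :: r) k true
              = pvStarts r (k + 1 + 1) false := by
            simp [pvStarts]
          have h2 : pvEnds (true :: false :: r) k = k :: pvEnds (false :: r) (k + 1) := by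
            simp [pvEnds]
          have h3 : pvStarts (false :: r) (k + 1) false = pvStarts r (k + 1 + 1) false :=
            pvStarts_false_head _ _ _
          rw [h1, h2, List.zip_cons_cons, ← h3, ihC (k + 1)]
          simp [pvRuns]

-- A's fold, characterised: state = finished pairs (as 2-lists) + optional open series.
theorem pvFoldA_eq (v n : Int) (xs : List Int) : ∀ (k : Int) (acc : List (Int × Int)) (st : Option Int),
    k + xs.length = n → (st.isSome → xs ≠ []) →
    ((PySem.List.enumerate xs k).foldl (fun s p =>
      let i := p.1
      let x := p.2
      if s ≠ [] ∧ (PySem.List.pyGetD s (-1) []).length < 2 then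
        let current := PySem.List.pyGetD s (-1) []
        if x = v then
          if i = n - 1 then s.dropLast ++ [current ++ [i]] else s
        else
          s.dropLast ++ [current ++ [i - 1]]
      else
        if x = v then
          if i = n - 1 then s ++ [[i, i]] else s ++ [[i]]
        else s)
      (acc.map (fun r => [r.1, r.2]) ++ (match st with | none => [] | some s0 => [[s0]])))
    = (acc ++ pvRuns (xs.map (fun x => x == v)) k st).map (fun r => [r.1, r.2]) := by
  induction xs with
  | nil =>
    intro k acc st hn hs
    cases st with
    | none => simp [PySem.List.enumerate_nil, pvRuns]
    | some s0 => exact absurd rfl (hs rfl)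
  | cons x t ih =>
    intro k acc st hn hs
    have hn' : k + ((t.length : Int) + 1) = n := by
      simp only [List.length_cons] at hn
      push_cast at hn
      omega
    simp only [PySem.List.enumerate_cons, List.foldl_cons]
    cases st with
    | none =>
      have hinit : (acc.map (fun r : Int × Int => [r.1, r.2]) ++
          (match (none : Option Int) with | none => [] | some s0 => [[s0]]))
          = acc.map (fun r : Int × Int => [r.1, r.2]) := by simp
      rw [hinit]
      have hcond : ¬ ((acc.map (fun r : Int × Int => [r.1, r.2])) ≠ [] ∧
          (PySem.List.pyGetD (acc.map (fun r : Int × Int => [r.1, r.2])) (-1) []).length < 2) := by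
        rcases acc.eq_nil_or_concat' with rfl | ⟨acc', a, rfl⟩
        · simp
        · simp [PySem.List.pyGetD_neg_one_append_singleton]
      rw [if_neg hcond]
      by_cases hx : x = v
      · rw [if_pos hx]
        by_cases hk : (k : Int) = n - 1
        · have ht : t = [] := by
            cases t with
            | nil => rfl
            | cons y u =>
              exfalso
              simp only [List.length_cons] at hn'
              push_cast at hn'
              omega
          subst ht
          rw [if_pos hk]
          simp [PySem.List.enumerate_nil, pvRuns, hx]
        · have ht : t ≠ [] := by
            intro h0
            subst h0
            simp at hn'
            omega
          rw [if_neg hk]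
          have step := ih (k + 1) acc (some k) (by omega) (fun _ => ht)
          simp only at step
          simpa [pvRuns, hx] using step
      · rw [if_neg hx]
        have step := ih (k + 1) acc none (by omega) (by simp)
        simp only at step
        simpa [pvRuns, hx] using step
    | some s0 =>
      have hcond : ((acc.map (fun r : Int × Int => [r.1, r.2]) ++ [[s0]]) ≠ [] ∧
          (PySem.List.pyGetD (acc.map (fun r : Int × Int => [r.1, r.2]) ++ [[s0]]) (-1) []).length < 2) := by
        simp [PySem.List.pyGetD_neg_one_append_singleton]
      simp only []
      rw [if_pos hcond]
      by_cases hx : x = v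
      · rw [if_pos hx]
        by_cases hk : (k : Int) = n - 1
        · have ht : t = [] := by
            cases t with
            | nil => rfl
            | cons y u =>
              exfalso
              simp only [List.length_cons] at hn'
              push_cast at hn'
              omega
          subst ht
          rw [if_pos hk]
          simp [PySem.List.enumerate_nil, pvRuns, hx,
            PySem.List.pyGetD_neg_one_append_singleton]
        · have ht : t ≠ [] := by
            intro h0
            subst h0
            simp at hn'
            omega
          rw [if_neg hk]
          have step := ih (k + 1) acc (some s0) (by omega) (fun _ => ht)
          simp only at step
          simpa [pvRuns, hx] using step
      · rw [if_neg hx]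
        have step := ih (k + 1) (acc ++ [(s0, k - 1)]) none (by omega) (by simp)
        simp only at step
        rw [show PySem.List.pyGetD (acc.map (fun r : Int × Int => [r.1, r.2]) ++ [[s0]]) (-1)
            ([] : List Int) = [s0] from PySem.List.pyGetD_neg_one_append_singleton _ _ _,
          List.dropLast_concat]
        simpa [pvRuns, hx] using step

-- ===== VERDICT (by name: the statement is the Claim_ definition above) =====
theorem get_series_indexes_in_list_spec : Claim_equal_get_series_indexes_in_list := by
  intro list_ value _
  unfold Spec_get_series_indexes_in_list get_series_indexes_in_list get_series_indexes_in_list_alt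
  simp only [PySem.List.slice_to_neg_one, PySem.List.slice_from_one]
  cases list_ with
  | nil => simp [PySem.List.enumerate_nil]
  | cons y ys =>
    have hA := pvFoldA_eq value (((y :: ys).length : Int)) (y :: ys) 0 [] none (by simp) (by simp)
    simp only [List.map_nil, List.nil_append] at hA
    rw [hA]
    rw [List.map_map]
    have hExt : ((pvRuns ((y :: ys).map (fun x => x == value)) 0 none).map
        ((fun r : List Int => (PySem.List.pyGetD r 0 0, PySem.List.pyGetD r 1 0)) ∘
          (fun r : Int × Int => [r.1, r.2])))
        = pvRuns ((y :: ys).map (fun x => x == value)) 0 none := by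
      rw [show ((fun r : List Int => (PySem.List.pyGetD r 0 0, PySem.List.pyGetD r 1 0)) ∘
          (fun r : Int × Int => [r.1, r.2])) = fun r : Int × Int => (r.1, r.2) from ?_]
      · simp
      · funext r
        simp [PySem.List.pyGetD, PySem.List.pyGet?, PySem.List.pyIdx?]
    rw [hExt]
    rw [show ((y :: ys).map (fun x => x == value)).tail
        = (ys.map (fun x => x == value)) from rfl]
    rw [pvStarts_eq, List.map_cons, pvEnds_eq]
    exact ((pvZip_runs ((y == value) :: ys.map (fun x => x == value))).1 0).symm
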